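-- pv_equiv track=rewrite | github.com/siawyoung/practice | problems/substring-form-in-string.py | matching_letters
-- ===== SOURCE A (Python) =====
-- from collections import defaultdict
--
-- def matching_letters(l, m):
--
--     dic = defaultdict(int)
--     for i in l:
--         dic[i] += 1
--
--     for i in m:
--         if dic[i] > 0:
--             dic[i] -= 1
--         if sum(dic.values()) == 0:
--             return True
--
--     return False
-- ===== SOURCE B (Python) =====
-- def matching_letters(l, m):
--     return all(m.count(c) >= l.count(c) for c in set(l))
-- ===== Notes on version B (the rewrite author's own statement) =====
-- stated objective: simpler
-- what changed: Replaces A's greedy scan over m with a mutable count dict and sum(dic.values()) recomputed after every character by a direct per-distinct-letter count comparison between l and m, removing the per-character sum over the dict.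
-- intended difference: On the single input l='' and m='', A returns False because it only ever returns True inside the loop over m, while B returns True, which is the intended value since the empty multiset is contained in any string. — e.g. on matching_letters("", ""): A returns false, B returns true
import Mathlib
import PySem

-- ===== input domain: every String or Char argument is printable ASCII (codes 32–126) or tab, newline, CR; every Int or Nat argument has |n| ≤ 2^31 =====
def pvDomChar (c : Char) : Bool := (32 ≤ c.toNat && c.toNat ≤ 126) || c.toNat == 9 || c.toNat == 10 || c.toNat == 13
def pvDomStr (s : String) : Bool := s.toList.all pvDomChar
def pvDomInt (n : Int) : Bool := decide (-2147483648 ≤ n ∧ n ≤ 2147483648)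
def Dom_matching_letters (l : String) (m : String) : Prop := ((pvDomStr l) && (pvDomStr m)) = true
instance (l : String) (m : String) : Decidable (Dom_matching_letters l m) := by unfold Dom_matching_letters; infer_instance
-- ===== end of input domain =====

-- B replaces A's greedy decrement-and-running-sum scan over m with a direct per-distinct-letter
-- count comparison between l and m (objective: simpler).


-- ===== PORT A =====
-- the `for i in m` loop with its early `return True`; the defaultdict read `dic[i]`
-- materialises the key (with its current value v, 0 if absent), hence the `insert i v`
def pyLoopA : List Char → PySem.Dict Char Int → Bool
  | [], _ => false
  | i :: rest, dic =>
    let v := dic.getD i 0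
    let dic := dic.insert i v
    let dic := if v > 0 then dic.insert i (v - 1) else dic
    if dic.values.sum = 0 then true else pyLoopA rest dic

def matching_letters (l : String) (m : String) : Bool :=
  let dic := l.toList.foldl (fun d i => d.insert i (d.getD i 0 + 1)) PySem.Dict.empty
  pyLoopA m.toList dic

-- ===== PORT B =====
def matching_letters_alt (l : String) (m : String) : Bool :=
  (PySem.Set.ofList l.toList).all (fun c => PySem.List.count m.toList c ≥ PySem.List.count l.toList c)

-- ===== PRECONDITION & SPEC =====
-- On the single input l = "" and m = "", A returns False (it only ever returns True inside the
-- loop over m), while B returns True — the intended value: the empty multiset is contained in anything.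
def D_matching_letters (l : String) (m : String) : Prop := l = "" ∧ m = ""
instance (l : String) (m : String) : Decidable (D_matching_letters l m) := by unfold D_matching_letters; infer_instance
def Spec_matching_letters (l : String) (m : String) (out : Bool) : Prop := ¬ D_matching_letters l m → out = matching_letters_alt l m
instance (l : String) (m : String) (out : Bool) : Decidable (Spec_matching_letters l m out) := by unfold Spec_matching_letters; infer_instance
def pvDiffWitness_matching_letters : String × String := ("", "")
def pvDiffWitnessOut_matching_letters : Bool × Bool := (false, true)

-- ===== CLAIM (what is proved, stated in full; the proofs are below) =====
def Claim_unchanged_matching_letters : Prop := ∀ (l : String) (m : String), Dom_matching_letters l m → Spec_matching_letters l m (matching_letters l m)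
def Claim_changed_matching_letters : Prop := Dom_matching_letters (pvDiffWitness_matching_letters.1) (pvDiffWitness_matching_letters.2) ∧ D_matching_letters (pvDiffWitness_matching_letters.1) (pvDiffWitness_matching_letters.2) ∧ matching_letters (pvDiffWitness_matching_letters.1) (pvDiffWitness_matching_letters.2) = pvDiffWitnessOut_matching_letters.1 ∧ matching_letters_alt (pvDiffWitness_matching_letters.1) (pvDiffWitness_matching_letters.2) = pvDiffWitnessOut_matching_letters.2 ∧ pvDiffWitnessOut_matching_letters.1 ≠ pvDiffWitnessOut_matching_letters.2
def Claim_exact_matching_letters : Prop := ∀ (l : String) (m : String), Dom_matching_letters l m → D_matching_letters l m → matching_letters l m ≠ matching_letters_alt l m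

-- ===== LEMMAS AND PROOFS =====

-- "letters of l still owed after consuming the prefix `pref` of m" (Nat subtraction truncates at 0)
def pvRem (f : Char → Nat) (pref : List Char) (c : Char) : Int := ((f c - pref.count c : Nat) : Int)

-- loop invariant: keys unique, every stored value is the owed count of its key,
-- and every letter still owed is present as a key
def pvInv (f : Char → Nat) (dic : PySem.Dict Char Int) (pref : List Char) : Prop :=
  dic.keys.Nodup ∧ (∀ p ∈ dic.items, p.2 = pvRem f pref p.1) ∧ (∀ c, f c ≠ 0 → dic.contains c = true)

lemma pv_sum_zero_iff (xs : List Int) (h : ∀ x ∈ xs, 0 ≤ x) : xs.sum = 0 ↔ ∀ x ∈ xs, x = 0 := by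
  induction xs with
  | nil => simp
  | cons a t ih =>
    simp only [List.sum_cons, List.mem_cons] at *
    have ha := h a (Or.inl rfl)
    have ht : 0 ≤ t.sum := List.sum_nonneg (fun x hx => h x (Or.inr hx))
    constructor
    · intro hs; have hz : a = 0 ∧ t.sum = 0 := by omega
      exact fun x hx => hx.elim (fun e => e ▸ hz.1)
        (fun hm => (ih (fun x hx => h x (Or.inr hx))).mp hz.2 x hm)
    · intro hz
      have h0 : t.sum = 0 := (ih (fun x hx => h x (Or.inr hx))).mpr (fun x hx => hz x (Or.inr hx))
      have := hz a (Or.inl rfl); omega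

lemma pv_getD_eq_rem (f : Char → Nat) (dic : PySem.Dict Char Int) (pref : List Char) (i : Char)
    (hinv : pvInv f dic pref) : dic.getD i 0 = pvRem f pref i := by
  obtain ⟨hnd, hitems, hcont⟩ := hinv
  cases hg : dic.get? i with
  | some w =>
    rw [PySem.Dict.getD_of_get?_eq_some dic 0 hg]
    exact hitems _ (PySem.Dict.mem_items_of_get?_eq_some dic hg)
  | none =>
    rw [PySem.Dict.getD_of_get?_eq_none dic 0 hg]
    have hf : f i = 0 := by
      by_contra hne
      have h2 := hcont i hne
      rw [PySem.Dict.contains_eq_isSome_get?, hg] at h2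
      simp at h2
    simp [pvRem, hf]

lemma pv_rem_step (f : Char → Nat) (pref : List Char) (i c : Char) :
    pvRem f (pref ++ [i]) c =
      if c = i then (if pvRem f pref i > 0 then pvRem f pref i - 1 else pvRem f pref i)
      else pvRem f pref c := by
  simp only [pvRem, List.count_append, List.count_singleton]
  split_ifs with h1 h2 h2 <;> simp_all <;> omega

lemma pv_inv_step (f : Char → Nat) (dic : PySem.Dict Char Int) (pref : List Char) (i : Char)
    (hinv : pvInv f dic pref) :
    pvInv f (dic.insert i (if dic.getD i 0 > 0 then dic.getD i 0 - 1 else dic.getD i 0)) (pref ++ [i]) := by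
  obtain ⟨hnd, hitems, hcont⟩ := hinv
  have hv := pv_getD_eq_rem f dic pref i ⟨hnd, hitems, hcont⟩
  refine ⟨PySem.Dict.nodup_keys_insert _ _ _ hnd, ?_, ?_⟩
  · intro p hp
    rw [PySem.Dict.mem_items_insert] at hp
    rcases hp with h | ⟨hp, hne⟩
    · subst h; simp [pv_rem_step, hv]
    · rw [pv_rem_step, if_neg hne]; exact hitems p hp
  · intro c hc
    rw [PySem.Dict.contains_insert]
    rcases eq_or_ne c i with h | h
    · simp [h]
    · simp [hcont c hc]

lemma pv_sum_values_iff (f : Char → Nat) (dic : PySem.Dict Char Int) (pref : List Char)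
    (hinv : pvInv f dic pref) : dic.values.sum = 0 ↔ ∀ c, f c ≤ pref.count c := by
  obtain ⟨hnd, hitems, hcont⟩ := hinv
  have hvals : dic.values = dic.items.map (·.2) := rfl
  have hkeys : dic.keys = dic.items.map (·.1) := rfl
  have hnn : ∀ x ∈ dic.values, 0 ≤ x := by
    intro x hx
    rw [hvals, List.mem_map] at hx
    obtain ⟨p, hp, rfl⟩ := hx
    rw [hitems p hp]; exact Int.natCast_nonneg _
  rw [pv_sum_zero_iff _ hnn]
  constructor
  · intro hz c
    by_cases hf : f c = 0
    · omega
    · have hcn := (PySem.Dict.contains_iff_mem_keys dic c).mp (hcont c hf)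
      rw [hkeys, List.mem_map] at hcn
      obtain ⟨p, hp, hpc⟩ := hcn
      have h0 : p.2 = 0 := hz p.2 (by rw [hvals, List.mem_map]; exact ⟨p, hp, rfl⟩)
      rw [hitems p hp, hpc, pvRem] at h0
      omega
  · intro hle x hx
    rw [hvals, List.mem_map] at hx
    obtain ⟨p, hp, rfl⟩ := hx
    rw [hitems p hp, pvRem]
    have := hle p.1
    omega

-- one step of A's loop, with the two writes at key i collapsed by insert_insert_self
lemma pyLoopA_cons (i : Char) (rest : List Char) (dic : PySem.Dict Char Int) :
    pyLoopA (i :: rest) dic =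
      (let dic' := dic.insert i (if dic.getD i 0 > 0 then dic.getD i 0 - 1 else dic.getD i 0)
       if dic'.values.sum = 0 then true else pyLoopA rest dic') := by
  show (let v := dic.getD i 0
        let d1 := dic.insert i v
        let d2 := if v > 0 then d1.insert i (v - 1) else d1
        if d2.values.sum = 0 then true else pyLoopA rest d2) = _
  simp only [PySem.Dict.insert_insert_self]
  by_cases h : dic.getD i 0 > 0 <;> simp [h]

lemma pv_loopA_iff (f : Char → Nat) : ∀ (rest : List Char) (dic : PySem.Dict Char Int) (pref : List Char),
    pvInv f dic pref →
    (pyLoopA rest dic = true ↔ (rest ≠ [] ∧ ∀ c, f c ≤ (pref ++ rest).count c)) := by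
  intro rest
  induction rest with
  | nil => intro dic pref _; simp [pyLoopA]
  | cons i t ih =>
    intro dic pref hinv
    rw [pyLoopA_cons]
    have hinv' := pv_inv_step f dic pref i hinv
    have hsum := pv_sum_values_iff f _ (pref ++ [i]) hinv'
    by_cases hz : (dic.insert i (if dic.getD i 0 > 0 then dic.getD i 0 - 1 else dic.getD i 0)).values.sum = 0
    · simp only [hz]
      have hle := hsum.mp hz
      constructor
      · intro _
        refine ⟨by simp, fun c => ?_⟩
        have := hle c
        simp only [List.count_append, List.count_cons, List.count_nil] at *
        omega
      · intro _; rfl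
    · rw [if_neg hz, ih _ (pref ++ [i]) hinv']
      constructor
      · intro ⟨ht, hc⟩
        exact ⟨by simp, by simpa [List.append_assoc] using hc⟩
      · intro ⟨_, hc⟩
        have hc' : ∀ c, f c ≤ ((pref ++ [i]) ++ t).count c := by simpa [List.append_assoc] using hc
        refine ⟨?_, hc'⟩
        rintro rfl
        exact hz (hsum.mpr (by simpa using hc'))

lemma pv_A_iff (l m : String) :
    matching_letters l m = true ↔ (m.toList ≠ [] ∧ ∀ c, l.toList.count c ≤ m.toList.count c) := by
  show pyLoopA m.toList (l.toList.foldl (fun d i => d.insert i (d.getD i 0 + 1)) PySem.Dict.empty) = true ↔ _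
  rw [PySem.Dict.foldl_insert_getD_add_one_eq_counter]
  have hinv : pvInv (fun c => l.toList.count c) (PySem.Dict.counter l.toList) [] := by
    refine ⟨PySem.Dict.nodup_keys_counter _, ?_, ?_⟩
    · intro p hp
      rw [PySem.Dict.items_counter, List.mem_map] at hp
      obtain ⟨k, _, rfl⟩ := hp
      simp [pvRem]
    · intro c hc
      rw [PySem.Dict.contains_counter]
      simp only [List.contains_eq_mem, decide_eq_true_eq]
      exact List.count_pos_iff.mp (Nat.pos_of_ne_zero hc)
  simpa using pv_loopA_iff (fun c => l.toList.count c) m.toList _ [] hinv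

lemma pv_B_iff (l m : String) :
    matching_letters_alt l m = true ↔ ∀ c, l.toList.count c ≤ m.toList.count c := by
  show (PySem.Set.ofList l.toList).all _ = true ↔ _
  rw [List.all_eq_true]
  constructor
  · intro hall c
    by_cases hc : c ∈ l.toList
    · have := hall c ((PySem.Set.mem_ofList _ _).mpr hc)
      simpa [PySem.List.count_eq] using this
    · simp [List.count_eq_zero.mpr hc]
  · intro hle c _
    simpa [PySem.List.count_eq] using hle c

-- ===== VERDICT (by name: the statement is the Claim_ definition above) =====
theorem matching_letters_spec : Claim_unchanged_matching_letters := by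
  intro l m _ hnd
  show matching_letters l m = matching_letters_alt l m
  rw [Bool.eq_iff_iff, pv_A_iff, pv_B_iff]
  by_cases hm : m.toList = []
  · have hl : l.toList ≠ [] := by
      intro h
      exact hnd ⟨String.toList_eq_nil_iff.mp h, String.toList_eq_nil_iff.mp hm⟩
    constructor
    · intro ⟨h, _⟩; exact absurd hm h
    · intro hall
      cases hcase : l.toList with
      | nil => exact absurd hcase hl
      | cons c t =>
        have h1 := hall c
        rw [hcase, hm] at h1
        simp at h1
  · simp [hm]

theorem matching_letters_changed : Claim_changed_matching_letters := by
  unfold Claim_changed_matching_letters; decide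

theorem matching_letters_tight : Claim_exact_matching_letters := by
  intro l m _ hd
  obtain ⟨hl, hm⟩ := hd
  subst hl; subst hm; decide
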